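-- pv_equiv track=rewrite | github.com/Dylanlafranky/ARA-GIT | 243BL10_lotto_prediction.py | strategy_anti_cluster
-- ===== SOURCE A (Python) =====
-- def strategy_anti_cluster(train_draws, test_draws):
--     """
--     Pick numbers that haven't appeared recently.
--     Theory: uniform distribution means long absences get "corrected."
--     (This is the gambler's fallacy — testing whether it has any signal.)
--     """
--     predictions = []
--     history = list(train_draws)
--
--     for i in range(len(test_draws)):
--         # How many draws since each number last appeared?
--         last_seen = {}
--         for j, d in enumerate(history):
--             for n in d:
--                 last_seen[n] = j
--
--         current_draw = len(history)
--         gaps = {}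
--         for n in range(1, 46):
--             if n in last_seen:
--                 gaps[n] = current_draw - last_seen[n]
--             else:
--                 gaps[n] = current_draw  # never seen
--
--         # Pick the 6 longest-absent numbers
--         sorted_by_gap = sorted(gaps.items(), key=lambda x: -x[1])
--         top6 = [n for n, g in sorted_by_gap[:6]]
--         predictions.append(sorted(top6))
--
--         history.append(test_draws[i])
--
--     return predictions
-- ===== SOURCE B (Python) =====
-- def strategy_anti_cluster(train_draws, test_draws):
--     # Incremental last_seen: O(total numbers + len(test)*45 log 45) instead of
--     # rescanning the whole history for every test draw.
--     last_seen = {}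
--     idx = 0
--     for d in train_draws:
--         for n in d:
--             last_seen[n] = idx
--         idx += 1
--     predictions = []
--     for d in test_draws:
--         order = sorted(range(1, 46), key=lambda n: (last_seen.get(n, 0) - idx, n))
--         predictions.append(sorted(order[:6]))
--         for n in d:
--             last_seen[n] = idx
--         idx += 1
--     return predictions
-- ===== Notes on version B (the rewrite author's own statement) =====
-- stated objective: faster
-- what changed: B maintains the last-seen-index dictionary incrementally (one update per appended draw) and sorts the fixed range 1..45 by the key (last_seen-idx, n), instead of rescanning the growing history and stably sorting a rebuilt gaps dict for every test draw.
import Mathlib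
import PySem

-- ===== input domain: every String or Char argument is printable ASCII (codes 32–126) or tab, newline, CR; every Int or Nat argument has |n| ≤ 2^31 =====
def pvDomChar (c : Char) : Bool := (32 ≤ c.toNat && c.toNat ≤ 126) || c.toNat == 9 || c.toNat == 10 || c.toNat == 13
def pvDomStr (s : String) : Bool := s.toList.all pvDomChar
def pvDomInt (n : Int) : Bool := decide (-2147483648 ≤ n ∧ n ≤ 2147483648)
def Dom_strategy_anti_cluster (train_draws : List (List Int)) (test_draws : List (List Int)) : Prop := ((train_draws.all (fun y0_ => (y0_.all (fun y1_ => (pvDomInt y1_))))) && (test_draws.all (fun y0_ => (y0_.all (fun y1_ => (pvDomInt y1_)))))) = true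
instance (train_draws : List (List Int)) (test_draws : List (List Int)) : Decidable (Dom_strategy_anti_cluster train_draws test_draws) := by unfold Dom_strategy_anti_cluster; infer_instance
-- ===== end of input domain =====

-- B maintains the last-seen index dictionary incrementally (one update per test draw)
-- instead of rescanning the whole history at every iteration: an asymptotic speed-up.

-- ===== PORT A =====
-- last_seen = {}; for j, d in enumerate(history): for n in d: last_seen[n] = j
def pvA_lastSeen (history : List (List Int)) : PySem.Dict Int Int :=
  (PySem.List.enumerate history 0).foldl
    (fun ls jd => jd.2.foldl (fun ls n => ls.insert n jd.1) ls) PySem.Dict.empty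

-- one iteration of A's main loop; state = (predictions, history)
def pvA_step (st : List (List Int) × List (List Int)) (t : List Int) :
    List (List Int) × List (List Int) :=
  let last_seen := pvA_lastSeen st.2
  let current : Int := st.2.length
  let gaps : PySem.Dict Int Int :=
    (PySem.List.pyRange 1 46 1).foldl
      (fun g n => match last_seen.get? n with
        | some j => g.insert n (current - j)
        | none => g.insert n current) PySem.Dict.empty
  let sorted_by_gap := PySem.List.sorted gaps.items (fun x => -x.2) false
  let top6 := (sorted_by_gap.take 6).map (·.1)
  (st.1 ++ [PySem.List.sorted top6 (fun x => x) false], st.2 ++ [t])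

def strategy_anti_cluster (train_draws : List (List Int)) (test_draws : List (List Int)) :
    List (List Int) :=
  (test_draws.foldl pvA_step ([], train_draws)).1

-- ===== PORT B =====
-- one iteration of B's loop; state = (predictions, last_seen, idx)
def pvB_step (st : List (List Int) × PySem.Dict Int Int × Int) (d : List Int) :
    List (List Int) × PySem.Dict Int Int × Int :=
  let order := PySem.List.sorted2 (PySem.List.pyRange 1 46 1)
      (fun n => st.2.1.getD n 0 - st.2.2) (fun n => n) false
  (st.1 ++ [PySem.List.sorted (order.take 6) (fun x => x) false],
   d.foldl (fun m n => m.insert n st.2.2) st.2.1, st.2.2 + 1)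

def strategy_anti_cluster_alt (train_draws : List (List Int)) (test_draws : List (List Int)) :
    List (List Int) :=
  let init := train_draws.foldl
    (fun (p : PySem.Dict Int Int × Int) d =>
      (d.foldl (fun m n => m.insert n p.2) p.1, p.2 + 1)) (PySem.Dict.empty, 0)
  (test_draws.foldl pvB_step ([], init.1, init.2)).1

-- ===== PRECONDITION & SPEC =====
def Spec_strategy_anti_cluster (train_draws : List (List Int)) (test_draws : List (List Int)) (out : List (List Int)) : Prop := out = strategy_anti_cluster_alt train_draws test_draws
instance (train_draws : List (List Int)) (test_draws : List (List Int)) (out : List (List Int)) : Decidable (Spec_strategy_anti_cluster train_draws test_draws out) := by unfold Spec_strategy_anti_cluster; infer_instance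

-- ===== CLAIM (what is proved, stated in full; the proofs are below) =====
def Claim_equal_strategy_anti_cluster : Prop := ∀ (train_draws : List (List Int)) (test_draws : List (List Int)), Dom_strategy_anti_cluster train_draws test_draws → Spec_strategy_anti_cluster train_draws test_draws (strategy_anti_cluster train_draws test_draws)

-- ===== LEMMAS AND PROOFS =====

-- mapping a list commutes with insertBy when f translates the comparator on the inserted element
theorem pv_insertBy_map {α β : Type} (f : α → β) (bef : α → α → Bool) (bef' : β → β → Bool)
    (x : α) : ∀ ys : List α, (∀ b ∈ ys, bef' (f x) (f b) = bef x b) →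
    (PySem.List.insertBy bef x ys).map f = PySem.List.insertBy bef' (f x) (ys.map f) := by
  intro ys
  induction ys with
  | nil => intro _; rfl
  | cons y ys ih =>
      intro h
      simp only [PySem.List.insertBy, List.map_cons]
      rw [h y (by simp)]
      by_cases hb : bef x y = true
      · simp [hb]
      · simp only [Bool.not_eq_true] at hb
        simp [hb]
        exact ih (fun b hbmem => h b (by simp [hbmem]))

-- mapping commutes with the whole insertion sort, provided the comparators agree
-- on every pair the sort actually compares
theorem pv_foldl_insertBy_map {α β : Type} (f : α → β) (bef : α → α → Bool)
    (bef' : β → β → Bool) :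
    ∀ (L : List α) (acc : List α),
      (∀ x ∈ L, ∀ b ∈ acc, bef' (f x) (f b) = bef x b) →
      L.Pairwise (fun a b => bef' (f b) (f a) = bef b a) →
      (L.foldl (fun acc x => PySem.List.insertBy bef x acc) acc).map f
        = (L.map f).foldl (fun acc y => PySem.List.insertBy bef' y acc) (acc.map f) := by
  intro L
  induction L with
  | nil => intro acc _ _; rfl
  | cons x L ih =>
      intro acc hacc hpw
      simp only [List.map_cons, List.foldl_cons]
      rw [← pv_insertBy_map f bef bef' x acc (hacc x (by simp))]
      apply ih
      · intro y hy b hb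
        rw [PySem.List.mem_insertBy] at hb
        rcases hb with rfl | hb
        · exact (List.pairwise_cons.mp hpw).1 y hy
        · exact hacc y (by simp [hy]) b hb
      · exact (List.pairwise_cons.mp hpw).2

-- one iteration of A picks exactly the 6 numbers B's sorted-by-(gap, n) prefix picks
theorem pv_step_top6 (ls : PySem.Dict Int Int) (idx : Int) :
    (((PySem.List.sorted
        (((PySem.List.pyRange 1 46 1).foldl
          (fun g n => match ls.get? n with
            | some j => g.insert n (idx - j)
            | none => g.insert n idx) PySem.Dict.empty)).items (fun x => -x.2) false).take 6).map (·.1))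
      = (PySem.List.sorted2 (PySem.List.pyRange 1 46 1)
          (fun n => ls.getD n 0 - idx) (fun n => n) false).take 6 := by
  have hfun : (fun (g : PySem.Dict Int Int) (n : Int) => match ls.get? n with
      | some j => g.insert n (idx - j)
      | none => g.insert n idx)
      = (fun g n => g.insert n (idx - ls.getD n 0)) := by
    funext g n
    cases h : ls.get? n with
    | some j => simp [PySem.Dict.getD_eq_get?_getD, h]
    | none => simp [PySem.Dict.getD_eq_get?_getD, h]
  rw [hfun]
  have hitems : (((PySem.List.pyRange 1 46 1).foldl
      (fun (g : PySem.Dict Int Int) n => g.insert n (idx - ls.getD n 0)) PySem.Dict.empty)).items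
      = (PySem.List.pyRange 1 46 1).map (fun n => (n, idx - ls.getD n 0)) := by
    have := PySem.Dict.items_foldl_insert_fresh (l := PySem.List.pyRange 1 46 1)
      (k := fun n => n) (v := fun n => idx - ls.getD n 0) (d := PySem.Dict.empty)
      (by intro a _; simp [PySem.Dict.contains_empty])
      (by simpa using PySem.List.nodup_pyRange_one 1 46)
    simpa using this
  rw [hitems]
  -- now relate the two sorts via the map lemma
  have hmap : (PySem.List.sorted
      ((PySem.List.pyRange 1 46 1).map (fun n => (n, idx - ls.getD n 0))) (fun x => -x.2) false)
      = (PySem.List.sorted2 (PySem.List.pyRange 1 46 1)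
          (fun n => ls.getD n 0 - idx) (fun n => n) false).map (fun n => (n, idx - ls.getD n 0)) := by
    rw [PySem.List.sorted_eq_foldl_insertBy]
    simp only [PySem.List.sorted2, Bool.false_eq_true, if_false]
    exact (pv_foldl_insertBy_map (fun n => (n, idx - ls.getD n 0))
      (fun a b => decide ((ls.getD a 0 - idx) < (ls.getD b 0 - idx)) ||
        (!decide ((ls.getD b 0 - idx) < (ls.getD a 0 - idx)) && decide (a < b)))
      (fun p q => decide (-p.2 < -q.2))
      (PySem.List.pyRange 1 46 1) []
      (by intro x _ b hb; simp at hb)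
      (by
        refine (PySem.List.pairwise_lt_pyRange_one 1 46 ).imp ?_
        intro a b hab
        have h1 : decide (b < a) = false := by simp; omega
        simp only [h1, Bool.and_false, Bool.or_false, neg_sub])).symm
  rw [hmap, List.map_take, List.map_map]
  have hid : ((fun (x : Int × Int) => x.1) ∘ fun n => (n, idx - ls.getD n 0)) = id := by
    funext n; rfl
  rw [hid, List.map_id]

-- recomputing A's last_seen over history ++ [t] = updating it with t at index |history|
theorem pv_lastSeen_append (h : List (List Int)) (t : List Int) :
    pvA_lastSeen (h ++ [t])
      = t.foldl (fun m n => m.insert n (h.length : Int)) (pvA_lastSeen h) := by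
  simp [pvA_lastSeen, PySem.List.enumerate_append, PySem.List.enumerate_cons,
    PySem.List.enumerate_nil, List.foldl_append]

-- B's training fold builds exactly A's last_seen dictionary, and counts the draws
theorem pv_init_eq : ∀ (l : List (List Int)) (m : PySem.Dict Int Int) (i : Int),
    l.foldl (fun (p : PySem.Dict Int Int × Int) d =>
      (d.foldl (fun m n => m.insert n p.2) p.1, p.2 + 1)) (m, i)
    = ((PySem.List.enumerate l i).foldl
        (fun ls jd => jd.2.foldl (fun ls n => ls.insert n jd.1) ls) m, i + l.length) := by
  intro l
  induction l with
  | nil => intro m i; simp [PySem.List.enumerate_nil]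
  | cons d l ih =>
      intro m i
      simp only [List.foldl_cons, PySem.List.enumerate_cons]
      rw [ih]
      refine Prod.ext rfl ?_
      simp only [List.length_cons]
      push_cast
      ring

-- the two main loops stay in lock-step
theorem pv_loop_eq : ∀ (test : List (List Int)) (preds history : List (List Int)),
    (test.foldl pvA_step (preds, history)).1
      = (test.foldl pvB_step (preds, pvA_lastSeen history, (history.length : Int))).1 := by
  intro test
  induction test with
  | nil => intro preds history; rfl
  | cons t rest ih =>
      intro preds history
      simp only [List.foldl_cons]
      have hstep : pvA_step (preds, history) t
          = (preds ++ [PySem.List.sorted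
              (((PySem.List.sorted2 (PySem.List.pyRange 1 46 1)
                (fun n => (pvA_lastSeen history).getD n 0 - (history.length : Int))
                (fun n => n) false).take 6)) (fun x => x) false], history ++ [t]) := by
        simp only [pvA_step]
        rw [pv_step_top6 (pvA_lastSeen history) (history.length : Int)]
      rw [hstep, ih]
      have hB : pvB_step (preds, pvA_lastSeen history, (history.length : Int)) t
          = (preds ++ [PySem.List.sorted
              (((PySem.List.sorted2 (PySem.List.pyRange 1 46 1)
                (fun n => (pvA_lastSeen history).getD n 0 - (history.length : Int))
                (fun n => n) false).take 6)) (fun x => x) false],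
             pvA_lastSeen (history ++ [t]), ((history ++ [t]).length : Int)) := by
        simp only [pvB_step]
        rw [pv_lastSeen_append]
        simp
      rw [hB]

-- ===== VERDICT (by name: the statement is the Claim_ definition above) =====
theorem strategy_anti_cluster_spec : Claim_equal_strategy_anti_cluster := by
  intro train test _
  unfold Spec_strategy_anti_cluster strategy_anti_cluster strategy_anti_cluster_alt
  rw [pv_init_eq]
  simpa [pvA_lastSeen] using pv_loop_eq test [] train
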